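-- pv_equiv track=rewrite | github.com/seandwkim/spotify-playlist-recsys | inference.py | enforce_caps
-- ===== SOURCE A (Python) =====
-- from collections import Counter
--
-- def enforce_caps(ranked_uris: list[str], artist_of: dict[str,str], cap: int):
--     if cap <= 0:
--         return ranked_uris
--     out, counts = [], Counter()
--     for u in ranked_uris:
--         a = artist_of.get(u)
--         if a is None or counts[a] < cap:
--             out.append(u)
--             if a is not None:
--                 counts[a] += 1
--     i = 0
--     while len(out) < len(ranked_uris) and i < len(ranked_uris):
--         u = ranked_uris[i]; i += 1
--         if u not in out:
--             out.append(u)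
--     return out[:len(ranked_uris)]
-- ===== SOURCE B (Python) =====
-- from collections import Counter
--
-- def enforce_caps(ranked_uris: list[str], artist_of: dict[str, str], cap: int):
--     if cap <= 0:
--         return ranked_uris
--     kept, overflow, seen, counts = [], [], set(), Counter()
--     for u in ranked_uris:
--         a = artist_of.get(u)
--         if a is None or counts[a] < cap:
--             kept.append(u)
--             seen.add(u)
--             if a is not None:
--                 counts[a] += 1
--         else:
--             overflow.append(u)
--     result = kept
--     for u in overflow:
--         if u not in seen:
--             result.append(u)
--             seen.add(u)
--     return result
-- ===== Notes on version B (the rewrite author's own statement) =====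
-- stated objective: simpler
-- what changed: B classifies each URI once into kept/overflow lists with a seen set, then appends unseen overflow items, replacing A's index-driven while loop that rescans the whole ranking with O(n) list-membership tests and its final no-op slice.
import Mathlib
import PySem

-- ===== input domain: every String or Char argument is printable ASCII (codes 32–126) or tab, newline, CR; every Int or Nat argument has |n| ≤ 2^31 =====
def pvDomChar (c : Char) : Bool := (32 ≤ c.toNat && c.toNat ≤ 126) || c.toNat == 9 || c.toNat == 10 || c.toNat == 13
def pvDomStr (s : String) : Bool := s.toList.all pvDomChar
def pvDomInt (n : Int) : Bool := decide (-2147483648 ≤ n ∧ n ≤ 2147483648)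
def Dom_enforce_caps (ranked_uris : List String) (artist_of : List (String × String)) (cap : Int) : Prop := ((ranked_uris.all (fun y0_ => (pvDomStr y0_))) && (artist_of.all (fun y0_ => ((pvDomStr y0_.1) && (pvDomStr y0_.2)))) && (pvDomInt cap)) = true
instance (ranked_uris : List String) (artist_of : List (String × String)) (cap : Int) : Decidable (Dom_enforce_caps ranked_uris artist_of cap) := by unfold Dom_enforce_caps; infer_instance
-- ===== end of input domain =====

-- B replaces A's index-driven while-loop refill (linear 'u not in out' scans and a final no-op
-- slice) by a single classification pass into kept/overflow plus a seen set; same return value.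

-- ===== PORT A =====
-- first for-loop body: state (out, counts)
def pass1A (d : PySem.Dict String String) (cap : Int)
    (st : List String × PySem.Dict String Int) (u : String) :
    List String × PySem.Dict String Int :=
  match d.get? u with
  | none => (st.1 ++ [u], st.2)
  | some a =>
      if st.2.getD a 0 < cap then (st.1 ++ [u], st.2.modify a 0 (· + 1))
      else (st.1, st.2)

-- the while loop: i walks ranked_uris (rem = suffix from i), guarded by len(out) < len(ranked_uris)
def refillA (n : Nat) : List String → List String → List String
  | [], out => out
  | u :: rest, out =>
      if out.length < n then
        if u ∈ out then refillA n rest out else refillA n rest (out ++ [u])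
      else out

def enforce_caps (ranked_uris : List String) (artist_of : List (String × String)) (cap : Int) : List String :=
  if cap ≤ 0 then ranked_uris
  else
    let d := PySem.Dict.ofList artist_of
    let out := (ranked_uris.foldl (pass1A d cap) ([], PySem.Dict.empty)).1
    let out2 := refillA ranked_uris.length ranked_uris out
    PySem.List.slice out2 none (some (ranked_uris.length : Int))

-- ===== PORT B =====
-- classification pass: state (kept, overflow, seen, counts)
def pass1B (d : PySem.Dict String String) (cap : Int)
    (st : List String × List String × PySem.Set String × PySem.Dict String Int) (u : String) :
    List String × List String × PySem.Set String × PySem.Dict String Int :=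
  match d.get? u with
  | none => (st.1 ++ [u], st.2.1, PySem.Set.add st.2.2.1 u, st.2.2.2)
  | some a =>
      if st.2.2.2.getD a 0 < cap then
        (st.1 ++ [u], st.2.1, PySem.Set.add st.2.2.1 u, st.2.2.2.modify a 0 (· + 1))
      else (st.1, st.2.1 ++ [u], st.2.2.1, st.2.2.2)

-- refill pass over overflow: state (result, seen)
def pass2B (st : List String × PySem.Set String) (u : String) : List String × PySem.Set String :=
  if PySem.Set.contains st.2 u then st else (st.1 ++ [u], PySem.Set.add st.2 u)

def enforce_caps_alt (ranked_uris : List String) (artist_of : List (String × String)) (cap : Int) : List String :=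
  if cap ≤ 0 then ranked_uris
  else
    let d := PySem.Dict.ofList artist_of
    let st := ranked_uris.foldl (pass1B d cap) ([], [], PySem.Set.empty, PySem.Dict.empty)
    (st.2.1.foldl pass2B (st.1, st.2.2.1)).1

-- ===== PRECONDITION & SPEC =====
def Spec_enforce_caps (ranked_uris : List String) (artist_of : List (String × String)) (cap : Int) (out : List String) : Prop := out = enforce_caps_alt ranked_uris artist_of cap
instance (ranked_uris : List String) (artist_of : List (String × String)) (cap : Int) (out : List String) : Decidable (Spec_enforce_caps ranked_uris artist_of cap out) := by unfold Spec_enforce_caps; infer_instance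

-- ===== CLAIM (what is proved, stated in full; the proofs are below) =====
def Claim_equal_enforce_caps : Prop := ∀ (ranked_uris : List String) (artist_of : List (String × String)) (cap : Int), Dom_enforce_caps ranked_uris artist_of cap → Spec_enforce_caps ranked_uris artist_of cap (enforce_caps ranked_uris artist_of cap)

-- ===== LEMMAS AND PROOFS =====

-- spec-level classification of ranked_uris into (kept, overflow)
def pvClassify (d : PySem.Dict String String) (cap : Int) :
    List String → PySem.Dict String Int → List String × List String
  | [], _ => ([], [])
  | u :: rest, counts =>
      match d.get? u with
      | none =>
          let p := pvClassify d cap rest counts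
          (u :: p.1, p.2)
      | some a =>
          if counts.getD a 0 < cap then
            let p := pvClassify d cap rest (counts.modify a 0 (· + 1))
            (u :: p.1, p.2)
          else
            let p := pvClassify d cap rest counts
            (p.1, u :: p.2)

-- A's refill without the length guard: ordered dedup-append
def pvDedup : List String → List String → List String
  | [], out => out
  | u :: rest, out => if u ∈ out then pvDedup rest out else pvDedup rest (out ++ [u])

lemma foldA_eq (d : PySem.Dict String String) (cap : Int) :
    ∀ (rs : List String) (out : List String) (counts : PySem.Dict String Int),
      (rs.foldl (pass1A d cap) (out, counts)).1 = out ++ (pvClassify d cap rs counts).1 := by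
  intro rs
  induction rs with
  | nil => intro out counts; simp [pvClassify]
  | cons u rest ih =>
      intro out counts
      cases h : d.get? u with
      | none => simp [pass1A, pvClassify, h, ih]
      | some a =>
          by_cases hlt : counts.getD a 0 < cap <;>
            simp [pass1A, pvClassify, h, hlt, ih]

lemma foldB_eq (d : PySem.Dict String String) (cap : Int) :
    ∀ (rs : List String) (kept ov : List String) (seen : PySem.Set String)
      (counts : PySem.Dict String Int),
      (rs.foldl (pass1B d cap) (kept, ov, seen, counts)).1
          = kept ++ (pvClassify d cap rs counts).1 ∧
      (rs.foldl (pass1B d cap) (kept, ov, seen, counts)).2.1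
          = ov ++ (pvClassify d cap rs counts).2 ∧
      (rs.foldl (pass1B d cap) (kept, ov, seen, counts)).2.2.1
          = (pvClassify d cap rs counts).1.foldl PySem.Set.add seen := by
  intro rs
  induction rs with
  | nil => intro kept ov seen counts; simp [pvClassify]
  | cons u rest ih =>
      intro kept ov seen counts
      cases h : d.get? u with
      | none => simp [pass1B, pvClassify, h, ih]
      | some a =>
          by_cases hlt : counts.getD a 0 < cap <;>
            simp [pass1B, pvClassify, h, hlt, ih]

lemma classify_len (d : PySem.Dict String String) (cap : Int) :
    ∀ (rs : List String) (counts : PySem.Dict String Int),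
      (pvClassify d cap rs counts).1.length + (pvClassify d cap rs counts).2.length
        = rs.length := by
  intro rs
  induction rs with
  | nil => intro counts; simp [pvClassify]
  | cons u rest ih =>
      intro counts
      cases h : d.get? u with
      | none => have := ih counts; simp [pvClassify, h]; omega
      | some a =>
          by_cases hlt : counts.getD a 0 < cap
          · have := ih (counts.modify a 0 (· + 1)); simp [pvClassify, h, hlt]; omega
          · have := ih counts; simp [pvClassify, h, hlt]; omega

lemma filter_len_le (d : PySem.Dict String String) (cap : Int) :
    ∀ (rs : List String) (counts : PySem.Dict String Int) (S : List String),
      (∀ x, x ∈ (pvClassify d cap rs counts).1 → x ∈ S) →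
      (rs.filter (fun u => !decide (u ∈ S))).length ≤ (pvClassify d cap rs counts).2.length := by
  intro rs
  induction rs with
  | nil => intro counts S _; simp
  | cons u rest ih =>
      intro counts S hS
      cases h : d.get? u with
      | none =>
          have hu : u ∈ S := by
            have := hS u; simp [pvClassify, h] at this; exact this
          have := ih counts S (by intro x hx; exact hS x (by simp [pvClassify, h, hx]))
          simp [pvClassify, h, hu]; exact this
      | some a =>
          by_cases hlt : counts.getD a 0 < cap
          · have hu : u ∈ S := by
              have := hS u; simp [pvClassify, h, hlt] at this; exact this
            have := ih (counts.modify a 0 (· + 1)) S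
              (by intro x hx; exact hS x (by simp [pvClassify, h, hlt, hx]))
            simp [pvClassify, h, hlt, hu]; exact this
          · have := ih counts S (by intro x hx; exact hS x (by simp [pvClassify, h, hlt, hx]))
            simp [List.filter_cons, pvClassify, h, hlt]
            by_cases hu : u ∈ S <;> simp [hu] <;> omega

lemma dedup_of_all_mem : ∀ (rem out : List String), (∀ x ∈ rem, x ∈ out) →
    pvDedup rem out = out := by
  intro rem
  induction rem with
  | nil => intro out _; rfl
  | cons u rest ih =>
      intro out h
      have hu : u ∈ out := h u (by simp)
      simp [pvDedup, hu]
      exact ih out (fun x hx => h x (by simp [hx]))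

lemma refill_eq_dedup (n : Nat) : ∀ (rem out : List String),
    out.length + (rem.filter (fun u => !decide (u ∈ out))).length ≤ n →
    refillA n rem out = pvDedup rem out := by
  intro rem
  induction rem with
  | nil => intro out _; rfl
  | cons u rest ih =>
      intro out hinv
      by_cases hlen : out.length < n
      · by_cases hu : u ∈ out
        · simp [refillA, pvDedup, hlen, hu]
          apply ih
          simp [hu] at hinv
          exact hinv
        · simp [refillA, pvDedup, hlen, hu]
          apply ih
          have hmono : (rest.filter (fun v => !decide (v ∈ out ++ [u]))).length
              ≤ (rest.filter (fun v => !decide (v ∈ out))).length := by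
            apply List.Sublist.length_le
            apply List.monotone_filter_right
            intro v hv
            simp at hv ⊢
            exact fun hvo => hv.1 hvo
          simp [hu] at hinv
          simp only [List.length_append, List.length_cons, List.length_nil]
          omega
      · have hz : (List.filter (fun u => !decide (u ∈ out)) (u :: rest)).length = 0 := by omega
        have hall : ∀ x ∈ u :: rest, x ∈ out := by
          rw [List.length_eq_zero_iff] at hz
          intro x hx
          by_contra hxo
          have : x ∈ List.filter (fun u => !decide (u ∈ out)) (u :: rest) :=
            List.mem_filter.mpr ⟨hx, by simpa using hxo⟩
          simp [hz] at this
        rw [dedup_of_all_mem _ _ hall]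
        simp [refillA, hlen]

lemma refill_len (n : Nat) : ∀ (rem out : List String),
    out.length ≤ n → (refillA n rem out).length ≤ n := by
  intro rem
  induction rem with
  | nil => intro out h; exact h
  | cons u rest ih =>
      intro out h
      by_cases hlen : out.length < n
      · by_cases hu : u ∈ out
        · simp [refillA, hlen, hu]; exact ih out h
        · simp [refillA, hlen, hu]
          exact ih (out ++ [u]) (by simp; omega)
      · simp [refillA, hlen]; exact h

lemma dedup_eq_pass2 (d : PySem.Dict String String) (cap : Int) :
    ∀ (rs : List String) (counts : PySem.Dict String Int)
      (out : List String) (seen : PySem.Set String),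
      (∀ x, x ∈ seen ↔ x ∈ out) →
      (∀ x, x ∈ (pvClassify d cap rs counts).1 → x ∈ out) →
      pvDedup rs out = ((pvClassify d cap rs counts).2.foldl pass2B (out, seen)).1 := by
  intro rs
  induction rs with
  | nil => intro counts out seen _ _; rfl
  | cons u rest ih
  =>
      intro counts out seen hseen hkept
      cases h : d.get? u with
      | none =>
          have hu : u ∈ out := hkept u (by simp [pvClassify, h])
          simp only [pvClassify, h, pvDedup, hu, if_pos]
          exact ih counts out seen hseen (fun x hx => hkept x (by simp [pvClassify, h, hx]))
      | some a =>
          by_cases hlt : counts.getD a 0 < cap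
          · have hu : u ∈ out := hkept u (by simp [pvClassify, h, hlt])
            simp only [pvClassify, h, hlt, if_pos, pvDedup, hu]
            exact ih (counts.modify a 0 (· + 1)) out seen hseen
              (fun x hx => hkept x (by simp [pvClassify, h, hlt, hx]))
          · simp only [pvClassify, h, hlt, if_neg, not_false_iff]
            by_cases hu : u ∈ out
            · have hc : PySem.Set.contains seen u = true :=
                (PySem.Set.contains_iff _ _).mpr ((hseen u).mpr hu)
              simp only [pvDedup, hu, if_pos, List.foldl_cons, pass2B, hc]
              exact ih counts out seen hseen
                (fun x hx => hkept x (by simp [pvClassify, h, hlt, hx]))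
            · have hc : PySem.Set.contains seen u = false := by
                rw [Bool.eq_false_iff]
                intro hcc
                exact hu ((hseen u).mp (((PySem.Set.contains_iff _ _).mp hcc)))
              simp only [pvDedup, hu, if_neg, not_false_iff, List.foldl_cons, pass2B, hc,
                Bool.false_eq_true]
              apply ih counts (out ++ [u]) (PySem.Set.add seen u)
              · intro x
                rw [PySem.Set.mem_add]
                simp [hseen x]
              · intro x hx
                have := hkept x (by simp [pvClassify, h, hlt, hx])
                simp [this]

-- ===== VERDICT (by name: the statement is the Claim_ definition above) =====
theorem enforce_caps_spec : Claim_equal_enforce_caps := by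
  intro ranked artist_of cap _dom
  unfold Spec_enforce_caps enforce_caps enforce_caps_alt
  by_cases hc : cap ≤ 0
  · simp [hc]
  · simp only [hc, if_false]
    set d := PySem.Dict.ofList artist_of with hd
    set c := pvClassify d cap ranked PySem.Dict.empty with hcdef
    have hA : (ranked.foldl (pass1A d cap) ([], PySem.Dict.empty)).1 = c.1 := by
      rw [foldA_eq]; simp [← hcdef]
    obtain ⟨hB1, hB2, hB3⟩ :=
      foldB_eq d cap ranked [] [] PySem.Set.empty PySem.Dict.empty
    have hn : c.1.length + c.2.length = ranked.length := classify_len d cap ranked _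
    have hfil : (ranked.filter (fun u => !decide (u ∈ c.1))).length ≤ c.2.length :=
      filter_len_le d cap ranked _ c.1 (fun x hx => hx)
    have hinv : c.1.length + (ranked.filter (fun u => !decide (u ∈ c.1))).length
        ≤ ranked.length := by omega
    have hrefill : refillA ranked.length ranked c.1 = pvDedup ranked c.1 :=
      refill_eq_dedup ranked.length ranked c.1 hinv
    have hseen : ∀ x, x ∈ c.1.foldl PySem.Set.add PySem.Set.empty ↔ x ∈ c.1 := by
      intro x
      have : c.1.foldl PySem.Set.add PySem.Set.empty
          = PySem.Set.update PySem.Set.empty c.1 := rfl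
      rw [this, PySem.Set.mem_update]
      simp [PySem.Set.empty]
    have hded : pvDedup ranked c.1 = (c.2.foldl pass2B (c.1, c.1.foldl PySem.Set.add PySem.Set.empty)).1 :=
      dedup_eq_pass2 d cap ranked PySem.Dict.empty c.1
        (c.1.foldl PySem.Set.add PySem.Set.empty) hseen (fun x hx => hx)
    have hlen2 : (refillA ranked.length ranked c.1).length ≤ ranked.length :=
      refill_len ranked.length ranked c.1 (by omega)
    have hslice : PySem.List.slice (refillA ranked.length ranked c.1) none
        (some (ranked.length : Int)) = refillA ranked.length ranked c.1 := by
      rw [PySem.List.slice_to_natCast]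
      exact List.take_of_length_le hlen2
    rw [hA, hslice, hrefill, hded, hB1, hB2, hB3]
    simp [← hcdef]
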